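-- pv_equiv track=rewrite | github.com/Alan-S-Andrade/drv | gen_rmat_csr.py | edges_to_csr
-- ===== SOURCE A (Python) =====
-- def edges_to_csr(N, edge_list):
--     """Convert sorted edge list to CSR arrays."""
--     degrees = [0] * N
--     for u, _ in edge_list:
--         degrees[u] += 1
--
--     offsets = [0] * (N + 1)
--     for i in range(N):
--         offsets[i + 1] = offsets[i] + degrees[i]
--
--     edges = [0] * len(edge_list)
--     pos = list(offsets)  # copy
--     for u, v in edge_list:
--         edges[pos[u]] = v
--         pos[u] += 1
--
--     return offsets, edges, degrees
-- ===== SOURCE B (Python) =====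
-- def edges_to_csr(N, edge_list):
--     """Convert sorted edge list to CSR arrays (bucket / adjacency-list formulation)."""
--     buckets = [[] for _ in range(N)]
--     for u, v in edge_list:
--         buckets[u].append(v)
--     degrees = [len(b) for b in buckets]
--     offsets = [0]
--     total = 0
--     for b in buckets:
--         total += len(b)
--         offsets.append(total)
--     edges = []
--     for b in buckets:
--         edges.extend(b)
--     return offsets, edges, degrees
-- ===== Notes on version B (the rewrite author's own statement) =====
-- stated objective: idiomatic
-- what changed: Replaces the three-array position-cursor scatter (degrees, offsets, pos cursor writing edges by index) with per-node adjacency buckets built in one pass and then flattened in node order, with degrees and offsets read off the bucket lengths.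
-- outside the precondition, e.g. on edges_to_csr(-1, []): A returns ([], [], []), B returns ([0], [], [])
import Mathlib
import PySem

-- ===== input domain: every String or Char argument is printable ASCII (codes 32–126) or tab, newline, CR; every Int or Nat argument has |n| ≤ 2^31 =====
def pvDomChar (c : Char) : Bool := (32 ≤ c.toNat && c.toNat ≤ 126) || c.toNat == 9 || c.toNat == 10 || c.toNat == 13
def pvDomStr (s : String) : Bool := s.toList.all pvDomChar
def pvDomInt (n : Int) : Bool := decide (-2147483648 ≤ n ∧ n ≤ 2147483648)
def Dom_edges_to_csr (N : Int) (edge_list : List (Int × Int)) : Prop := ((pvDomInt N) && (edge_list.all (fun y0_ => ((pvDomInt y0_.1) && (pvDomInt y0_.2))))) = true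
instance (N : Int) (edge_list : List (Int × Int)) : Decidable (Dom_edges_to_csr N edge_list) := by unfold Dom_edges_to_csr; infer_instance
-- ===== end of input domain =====

-- B replaces A's position-cursor scatter (degrees, prefix-sum offsets, a pos cursor array
-- scattering edge targets by index) with per-node buckets built in one pass and flattened in
-- node order; same cost, more direct (objective: idiomatic).

-- ===== PORT A =====
-- `degrees[u] += 1` (read then write; exact for 0 ≤ u < len, the only case inside Pre_)
def aDegStep (d : List Int) (q : Int × Int) : List Int :=
  PySem.List.pySetD d q.1 (PySem.List.pyGetD d q.1 0 + 1)
-- `offsets[i+1] = offsets[i] + degrees[i]`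
def aOffStep (deg : List Int) (off : List Int) (i : Int) : List Int :=
  PySem.List.pySetD off (i + 1) (PySem.List.pyGetD off i 0 + PySem.List.pyGetD deg i 0)
-- `edges[pos[u]] = v; pos[u] += 1` on the state (edges, pos)
def aScatStep (s : List Int × List Int) (q : Int × Int) : List Int × List Int :=
  (PySem.List.pySetD s.1 (PySem.List.pyGetD s.2 q.1 0) q.2,
   PySem.List.pySetD s.2 q.1 (PySem.List.pyGetD s.2 q.1 0 + 1))

def edges_to_csr (N : Int) (edge_list : List (Int × Int)) : List Int × List Int × List Int :=
  let degrees := edge_list.foldl aDegStep (List.replicate N.toNat (0 : Int))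
  let offsets := (PySem.List.pyRange 0 N 1).foldl (aOffStep degrees)
      (List.replicate (N + 1).toNat (0 : Int))
  let ep := edge_list.foldl aScatStep (List.replicate edge_list.length (0 : Int), offsets)
  (offsets, ep.1, degrees)

-- ===== PORT B =====
-- `buckets[u].append(v)`
def bBuckStep (bs : List (List Int)) (q : Int × Int) : List (List Int) :=
  PySem.List.pySetD bs q.1 (PySem.List.pyGetD bs q.1 [] ++ [q.2])
-- `total += len(b); offsets.append(total)` on the state (offsets, total)
def bOTStep (s : List Int × Int) (b : List Int) : List Int × Int :=
  (s.1 ++ [s.2 + (b.length : Int)], s.2 + (b.length : Int))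
-- `edges.extend(b)`
def bCatStep (e : List Int) (b : List Int) : List Int := e ++ b

def edges_to_csr_alt (N : Int) (edge_list : List (Int × Int)) : List Int × List Int × List Int :=
  let buckets := edge_list.foldl bBuckStep (List.replicate N.toNat ([] : List Int))
  let degrees := buckets.map (fun b => (b.length : Int))
  let ot := buckets.foldl bOTStep ([0], 0)
  let edges := buckets.foldl bCatStep ([] : List Int)
  (ot.1, edges, degrees)

-- ===== PRECONDITION & SPEC =====
-- Pre_ excludes negative N and node ids outside [0, N): there A either raises IndexError or
-- returns values shaped by Python negative-index wraparound (its pos array has length N+1, so a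
-- negative u reads a different slot than the degrees array), an accident of A's implementation.
def Pre_edges_to_csr (N : Int) (edge_list : List (Int × Int)) : Prop :=
  0 ≤ N ∧ ∀ q ∈ edge_list, 0 ≤ q.1 ∧ q.1 < N
instance (N : Int) (edge_list : List (Int × Int)) : Decidable (Pre_edges_to_csr N edge_list) := by
  unfold Pre_edges_to_csr; infer_instance

def pvWitness_edges_to_csr : Int × (List (Int × Int)) := (3, [(0, 5), (2, 7), (0, 1)])

def Spec_edges_to_csr (N : Int) (edge_list : List (Int × Int)) (out : List Int × List Int × List Int) : Prop := out = edges_to_csr_alt N edge_list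
instance (N : Int) (edge_list : List (Int × Int)) (out : List Int × List Int × List Int) : Decidable (Spec_edges_to_csr N edge_list out) := by unfold Spec_edges_to_csr; infer_instance

-- ===== CLAIM (what is proved, stated in full; the proofs are below) =====
def Claim_equal_edges_to_csr : Prop := ∀ (N : Int) (edge_list : List (Int × Int)), Dom_edges_to_csr N edge_list → Pre_edges_to_csr N edge_list → Spec_edges_to_csr N edge_list (edges_to_csr N edge_list)

-- ===== LEMMAS AND PROOFS =====

-- number of edges out of node u
def cnt (u : Int) (l : List (Int × Int)) : Nat := l.countP (fun q => q.1 == u)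
-- targets of the edges out of node u, in encounter order
def vals (u : Int) (l : List (Int × Int)) : List Int :=
  l.filterMap (fun q => if q.1 = u then some q.2 else none)
-- CSR offset of node k (prefix sum of counts)
def offf (l : List (Int × Int)) : Nat → Nat
  | 0 => 0
  | k + 1 => offf l k + cnt (k : Int) l
-- prefix sums of bucket lengths
def psum (bs : List (List Int)) (k : Nat) : Nat := ((bs.take k).map List.length).sum

theorem cnt_cons (u : Int) (q : Int × Int) (l : List (Int × Int)) :
    cnt u (q :: l) = cnt u l + (if q.1 = u then 1 else 0) := by
  simp [cnt, List.countP_cons]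

theorem vals_cons (u : Int) (q : Int × Int) (l : List (Int × Int)) :
    vals u (q :: l) = (if q.1 = u then [q.2] else []) ++ vals u l := by
  simp [vals, List.filterMap_cons]; split <;> simp_all

theorem length_vals (u : Int) (l : List (Int × Int)) : (vals u l).length = cnt u l := by
  induction l with
  | nil => rfl
  | cons q l ih => rw [vals_cons, cnt_cons]; split <;> simp [ih]

theorem getD_set {α : Type} (xs : List α) (n m : Nat) (v d : α) :
    (xs.set n v).getD m d = if n = m ∧ n < xs.length then v else xs.getD m d := by
  simp only [List.getD, List.getElem?_set]
  by_cases h1 : n = m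
  · subst h1; by_cases h2 : n < xs.length <;> simp [h2]
  · simp [h1]

theorem pyGetD_nonneg {α : Type} (xs : List α) (u : Int) (d : α) (h : 0 ≤ u) :
    PySem.List.pyGetD xs u d = xs.getD u.toNat d := by
  have := PySem.List.pyGetD_natCast xs u.toNat d
  rwa [Int.toNat_of_nonneg h] at this

theorem offf_succ_sub (l : List (Int × Int)) (k : Nat) : offf l (k+1) = offf l k + cnt (k:Int) l := rfl

theorem offf_mono (l : List (Int × Int)) (a b : Nat) (h : a ≤ b) : offf l a ≤ offf l b := by
  induction b with
  | zero => have : a = 0 := by omega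
            subst this; exact Nat.le_refl _
  | succ b ih =>
    by_cases h' : a = b + 1
    · subst h'; exact Nat.le_refl _
    · have := ih (by omega); rw [offf_succ_sub]; omega

theorem offf_cons (q : Int × Int) (l : List (Int × Int)) (k : Nat) :
    offf (q :: l) k = offf l k + (if 0 ≤ q.1 ∧ q.1 < (k : Int) then 1 else 0) := by
  induction k with
  | zero => simp [offf]
  | succ k ih =>
    rw [offf_succ_sub, offf_succ_sub, ih, cnt_cons]
    push_cast
    split_ifs <;> omega

theorem offf_total (l : List (Int × Int)) (K : Nat)
    (h : ∀ q ∈ l, 0 ≤ q.1 ∧ q.1 < (K : Int)) : offf l K = l.length := by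
  induction l with
  | nil =>
    induction K with
    | zero => rfl
    | succ K ih => rw [offf_succ_sub, ih (by simp)]; rfl
  | cons q l ih =>
    rw [offf_cons]
    have hq := h q (by simp)
    have := ih (fun q hq => h q (by simp [hq]))
    simp [hq]; omega

theorem offf_eq_sum (l : List (Int × Int)) (k : Nat) :
    offf l k = ((List.range k).map (fun i : Nat => cnt (i : Int) l)).sum := by
  induction k with
  | zero => rfl
  | succ k ih => rw [offf_succ_sub, ih, List.range_succ]; simp

theorem exists_slot (l : List (Int × Int)) (K : Nat) (j : Nat) (h : j < offf l K) :
    ∃ u, u < K ∧ offf l u ≤ j ∧ j < offf l (u + 1) := by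
  induction K with
  | zero => simp [offf] at h
  | succ K ih =>
    rcases Nat.lt_or_ge j (offf l K) with h' | h'
    · obtain ⟨u, hu⟩ := ih h'; exact ⟨u, by omega, hu.2⟩
    · exact ⟨K, by omega, h', h⟩

-- ---- degrees (first loop of A) ----
theorem deg_fold (l : List (Int × Int)) (d : List Int)
    (h : ∀ q ∈ l, 0 ≤ q.1 ∧ q.1 < (d.length : Int)) :
    (l.foldl aDegStep d).length = d.length ∧
    ∀ i < d.length, (l.foldl aDegStep d).getD i 0 = d.getD i 0 + cnt (i : Int) l := by
  induction l generalizing d with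
  | nil => exact ⟨rfl, fun i _ => by simp [cnt]⟩
  | cons q l ih =>
    have hq := h q (by simp)
    have hd'len : (aDegStep d q).length = d.length := by
      simp [aDegStep, PySem.List.pySetD_of_nonneg _ _ hq.1]
    obtain ⟨hlen, hpt⟩ := ih (aDegStep d q)
      (by rw [hd'len]; exact fun q' hq' => h q' (by simp [hq']))
    refine ⟨by simp only [List.foldl_cons]; rw [hlen, hd'len], ?_⟩
    intro i hi
    simp only [List.foldl_cons]
    rw [hpt i (by omega)]
    have hstep : (aDegStep d q).getD i 0 = d.getD i 0 + (if q.1 = (i : Int) then 1 else 0) := by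
      have hqlt : q.1.toNat < d.length := by omega
      simp only [aDegStep, PySem.List.pySetD_of_nonneg _ _ hq.1, pyGetD_nonneg _ _ _ hq.1,
        getD_set]
      split_ifs with h1 h2
      · rw [h1.1]
      · exfalso; omega
      · exact absurd ⟨by omega, hqlt⟩ h1
      · omega
    rw [hstep, cnt_cons]
    push_cast
    split_ifs <;> omega

-- ---- buckets (B's first loop) ----
theorem buck_fold (l : List (Int × Int)) (bs : List (List Int))
    (h : ∀ q ∈ l, 0 ≤ q.1 ∧ q.1 < (bs.length : Int)) :
    (l.foldl bBuckStep bs).length = bs.length ∧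
    ∀ i < bs.length, (l.foldl bBuckStep bs).getD i [] = bs.getD i [] ++ vals (i : Int) l := by
  induction l generalizing bs with
  | nil => exact ⟨rfl, fun i _ => by simp [vals]⟩
  | cons q l ih =>
    have hq := h q (by simp)
    have hd'len : (bBuckStep bs q).length = bs.length := by
      simp [bBuckStep, PySem.List.pySetD_of_nonneg _ _ hq.1]
    obtain ⟨hlen, hpt⟩ := ih (bBuckStep bs q)
      (by rw [hd'len]; exact fun q' hq' => h q' (by simp [hq']))
    refine ⟨by simp only [List.foldl_cons]; rw [hlen, hd'len], ?_⟩
    intro i hi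
    simp only [List.foldl_cons]
    rw [hpt i (by omega)]
    have hstep : (bBuckStep bs q).getD i [] =
        bs.getD i [] ++ (if q.1 = (i : Int) then [q.2] else []) := by
      have hqlt : q.1.toNat < bs.length := by omega
      simp only [bBuckStep, PySem.List.pySetD_of_nonneg _ _ hq.1, pyGetD_nonneg _ _ _ hq.1,
        getD_set]
      split_ifs with h1 h2
      · rw [h1.1]
      · exfalso; omega
      · exact absurd ⟨by omega, hqlt⟩ h1
      · simp
    rw [hstep, vals_cons]
    by_cases hqi : q.1 = (i : Int) <;> simp [hqi]

theorem pyGetD_pySetD_pt (p : List Int) (u w : Int) (x : Int)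
    (hu : 0 ≤ u) (hw : 0 ≤ w) (hlt : u < (p.length : Int)) :
    PySem.List.pyGetD (PySem.List.pySetD p u x) w 0
      = if w = u then x else PySem.List.pyGetD p w 0 := by
  rw [PySem.List.pySetD_of_nonneg _ _ hu, pyGetD_nonneg _ _ _ hw, pyGetD_nonneg _ _ _ hw,
    getD_set]
  split_ifs <;> first | rfl | (exfalso; omega)

-- ---- scatter: positions not owned by any remaining edge keep their value ----
theorem scat_untouched (l : List (Int × Int)) (e p : List Int) (j : Nat)
    (hq : ∀ q ∈ l, 0 ≤ q.1 ∧ q.1 < (p.length : Int))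
    (hpos : ∀ q ∈ l, 0 ≤ PySem.List.pyGetD p q.1 0)
    (hout : ∀ q ∈ l, ¬ (PySem.List.pyGetD p q.1 0 ≤ (j : Int) ∧
        (j : Int) < PySem.List.pyGetD p q.1 0 + (cnt q.1 l : Int))) :
    (l.foldl aScatStep (e, p)).1.getD j 0 = e.getD j 0 := by
  induction l generalizing e p with
  | nil => rfl
  | cons q l ih =>
    have hq0 := hq q (by simp)
    have hp0 := hpos q (by simp)
    have hcnt : cnt q.1 (q :: l) = cnt q.1 l + 1 := by rw [cnt_cons]; simp
    have hout0 := hout q (by simp)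
    simp only [List.foldl_cons]
    have hstep : aScatStep (e, p) q
        = (PySem.List.pySetD e (PySem.List.pyGetD p q.1 0) q.2,
           PySem.List.pySetD p q.1 (PySem.List.pyGetD p q.1 0 + 1)) := rfl
    rw [hstep]
    have hPget : ∀ w : Int, 0 ≤ w →
        PySem.List.pyGetD (PySem.List.pySetD p q.1 (PySem.List.pyGetD p q.1 0 + 1)) w 0
          = if w = q.1 then PySem.List.pyGetD p q.1 0 + 1 else PySem.List.pyGetD p w 0 :=
      fun w hw => pyGetD_pySetD_pt p q.1 w _ hq0.1 hw hq0.2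
    rw [ih _ _ (by simpa using fun q' hq' => hq q' (by simp [hq']))
        (by intro q' hq'
            rw [hPget q'.1 (hq q' (by simp [hq'])).1]
            split_ifs
            · omega
            · exact hpos q' (by simp [hq']))
        (by intro q' hq'
            rw [hPget q'.1 (hq q' (by simp [hq'])).1]
            by_cases hqq : q'.1 = q.1
            · rw [if_pos hqq]
              have hcc : cnt q'.1 l + 1 = cnt q.1 (q :: l) := by rw [hqq, hcnt]
              intro hc; exact hout0 (by rw [hqq] at hc; omega)
            · rw [if_neg hqq]
              have : cnt q'.1 (q :: l) = cnt q'.1 l + (if q.1 = q'.1 then 1 else 0) := cnt_cons _ _ _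
              have hle : cnt q'.1 l ≤ cnt q'.1 (q :: l) := by omega
              have := hout q' (by simp [hq'])
              intro hc; exact this (by omega))]
    -- the single write hits an index ≠ j
    rw [PySem.List.pySetD_of_nonneg _ _ hp0, getD_set]
    split_ifs with h1
    · exfalso; exact hout0 ⟨by omega, by omega⟩
    · rfl

-- ---- scatter: the t-th remaining edge of node u lands at pos[u] + t ----
theorem scat_hit (l : List (Int × Int)) (e p : List Int) (u : Int) (t : Nat)
    (hu : 0 ≤ u ∧ u < (p.length : Int))
    (hpu : 0 ≤ PySem.List.pyGetD p u 0)
    (hq : ∀ q ∈ l, 0 ≤ q.1 ∧ q.1 < (p.length : Int))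
    (hpos : ∀ q ∈ l, 0 ≤ PySem.List.pyGetD p q.1 0)
    (ht : t < cnt u l)
    (hdisj : ∀ q ∈ l, q.1 ≠ u →
        PySem.List.pyGetD p q.1 0 + (cnt q.1 l : Int) ≤ PySem.List.pyGetD p u 0 ∨
        PySem.List.pyGetD p u 0 + (cnt u l : Int) ≤ PySem.List.pyGetD p q.1 0)
    (hbound : PySem.List.pyGetD p u 0 + (cnt u l : Int) ≤ (e.length : Int)) :
    (l.foldl aScatStep (e, p)).1.getD ((PySem.List.pyGetD p u 0).toNat + t) 0
      = (vals u l).getD t 0 := by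
  induction l generalizing e p t with
  | nil => simp [cnt] at ht
  | cons q l ih =>
    have hq0 := hq q (by simp)
    have hp0 := hpos q (by simp)
    simp only [List.foldl_cons]
    have hstep : aScatStep (e, p) q
        = (PySem.List.pySetD e (PySem.List.pyGetD p q.1 0) q.2,
           PySem.List.pySetD p q.1 (PySem.List.pyGetD p q.1 0 + 1)) := rfl
    rw [hstep]
    have hPget : ∀ w : Int, 0 ≤ w →
        PySem.List.pyGetD (PySem.List.pySetD p q.1 (PySem.List.pyGetD p q.1 0 + 1)) w 0
          = if w = q.1 then PySem.List.pyGetD p q.1 0 + 1 else PySem.List.pyGetD p w 0 :=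
      fun w hw => pyGetD_pySetD_pt p q.1 w _ hq0.1 hw hq0.2
    have hElen : (PySem.List.pySetD e (PySem.List.pyGetD p q.1 0) q.2).length = e.length :=
      PySem.List.length_pySetD _ _ _
    have hq' : ∀ q' ∈ l, 0 ≤ q'.1 ∧ q'.1 <
        ((PySem.List.pySetD p q.1 (PySem.List.pyGetD p q.1 0 + 1)).length : Int) := by
      simpa [PySem.List.length_pySetD] using fun q' hq' => hq q' (by simp [hq'])
    have hpos' : ∀ q' ∈ l,
        0 ≤ PySem.List.pyGetD (PySem.List.pySetD p q.1 (PySem.List.pyGetD p q.1 0 + 1)) q'.1 0 := by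
      intro q' hq'
      rw [hPget q'.1 (hq q' (by simp [hq'])).1]
      split_ifs
      · omega
      · exact hpos q' (by simp [hq'])
    by_cases hw : q.1 = u
    · have hcnt : cnt u (q :: l) = cnt u l + 1 := by rw [cnt_cons]; simp [hw]
      have hvals : vals u (q :: l) = q.2 :: vals u l := by rw [vals_cons]; simp [hw]
      have hPu : PySem.List.pyGetD (PySem.List.pySetD p q.1 (PySem.List.pyGetD p q.1 0 + 1)) u 0
          = PySem.List.pyGetD p u 0 + 1 := by
        rw [hPget u hu.1, if_pos hw.symm, hw]
      cases t with
      | zero =>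
        rw [Nat.add_zero,
          scat_untouched l _ _ ((PySem.List.pyGetD p u 0).toNat) hq' hpos' ?hout]
        case hout =>
          intro q' hq'mem
          rw [hPget q'.1 (hq q' (by simp [hq'mem])).1]
          by_cases hqq : q'.1 = u
          · rw [if_pos (hqq.trans hw.symm), hw]
            intro hc; omega
          · rw [if_neg (fun hc => hqq (hc.trans hw))]
            have hcq : cnt q'.1 (q :: l) = cnt q'.1 l := by
              rw [cnt_cons, if_neg (fun hc : q.1 = q'.1 => hqq (hc.symm.trans hw))]; omega
            have hd := hdisj q' (by simp [hq'mem]) hqq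
            intro hc; omega
        rw [PySem.List.pySetD_of_nonneg _ _ hp0, hw, getD_set, hvals]
        have hlt : (PySem.List.pyGetD p u 0).toNat < e.length := by omega
        rw [if_pos ⟨rfl, hlt⟩]
        rfl
      | succ s =>
        have hthis := ih (PySem.List.pySetD e (PySem.List.pyGetD p q.1 0) q.2)
          (PySem.List.pySetD p q.1 (PySem.List.pyGetD p q.1 0 + 1)) s
          ⟨hu.1, by rw [PySem.List.length_pySetD]; exact hu.2⟩
          (by rw [hPu]; omega)
          hq' hpos'
          (by omega)
          (by intro q' hq'mem hqq
              rw [hPget q'.1 (hq q' (by simp [hq'mem])).1,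
                if_neg (fun hc => hqq (hc.trans hw)), hPu]
              have hcq : cnt q'.1 (q :: l) = cnt q'.1 l := by
                rw [cnt_cons, if_neg (fun hc : q.1 = q'.1 => hqq (hc.symm.trans hw))]; omega
              have hd := hdisj q' (by simp [hq'mem]) hqq
              omega)
          (by rw [hPu, hElen]; omega)
        rw [hPu] at hthis
        have hidx : (PySem.List.pyGetD p u 0 + 1).toNat + s
            = (PySem.List.pyGetD p u 0).toNat + (s + 1) := by omega
        rw [hidx] at hthis
        rw [hthis, hvals]
        rfl
    · have hcnt : cnt u (q :: l) = cnt u l := by rw [cnt_cons]; simp [hw]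
      have hvals : vals u (q :: l) = vals u l := by rw [vals_cons]; simp [hw]
      have hPu : PySem.List.pyGetD (PySem.List.pySetD p q.1 (PySem.List.pyGetD p q.1 0 + 1)) u 0
          = PySem.List.pyGetD p u 0 := by
        rw [hPget u hu.1, if_neg (fun hc => hw hc.symm)]
      have hdhead := hdisj q (by simp) hw
      have hcnthead : cnt q.1 (q :: l) = cnt q.1 l + 1 := by rw [cnt_cons]; simp
      have hthis := ih (PySem.List.pySetD e (PySem.List.pyGetD p q.1 0) q.2)
        (PySem.List.pySetD p q.1 (PySem.List.pyGetD p q.1 0 + 1)) t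
        ⟨hu.1, by rw [PySem.List.length_pySetD]; exact hu.2⟩
        (by rw [hPu]; exact hpu)
        hq' hpos'
        (by omega)
        (by intro q' hq'mem hqq
            rw [hPget q'.1 (hq q' (by simp [hq'mem])).1, hPu]
            by_cases hqq' : q'.1 = q.1
            · rw [if_pos hqq']
              have hcq : cnt q'.1 l ≤ cnt q.1 l := by rw [hqq']
              omega
            · rw [if_neg hqq']
              have hcq : cnt q'.1 (q :: l) = cnt q'.1 l := by
                rw [cnt_cons, if_neg (fun hc : q.1 = q'.1 => hqq' hc.symm)]; omega
              have hd := hdisj q' (by simp [hq'mem]) hqq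
              omega)
        (by rw [hPu, hElen]; omega)
      rw [hPu] at hthis
      rw [hthis, hvals]

-- ---- B's offsets fold ----
theorem psum_cons_succ (b : List Int) (bs : List (List Int)) (k : Nat) :
    psum (b :: bs) (k + 1) = b.length + psum bs k := by
  simp [psum, List.take_succ_cons]

theorem ot_fold (bs : List (List Int)) (o : List Int) (t : Int) :
    (bs.foldl bOTStep (o, t)).1
      = o ++ (List.range bs.length).map (fun k => t + (psum bs (k + 1) : Int)) := by
  induction bs generalizing o t with
  | nil => simp [psum]
  | cons b bs ih =>
    simp only [List.foldl_cons, bOTStep]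
    rw [ih, List.length_cons, List.range_succ_eq_map, List.map_cons, List.map_map,
      List.append_assoc, List.singleton_append]
    congr 2
    apply List.map_congr_left
    intro k _
    simp only [Function.comp_apply, Nat.succ_eq_add_one]
    rw [psum_cons_succ b bs (k + 1)]
    push_cast; ring

-- ---- B's concat fold ----
theorem cat_fold (bs : List (List Int)) (e : List Int) :
    bs.foldl bCatStep e = e ++ bs.flatten := by
  induction bs generalizing e with
  | nil => simp
  | cons b bs ih => simp [bCatStep, ih]

-- ---- flatten indexing by slot ----
theorem flatten_getD (bs : List (List Int)) (j u : Nat) (hu : u < bs.length)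
    (h1 : psum bs u ≤ j) (h2 : j < psum bs (u + 1)) :
    bs.flatten.getD j 0 = (bs.getD u []).getD (j - psum bs u) 0 := by
  induction bs generalizing j u with
  | nil => simp at hu
  | cons b bs ih =>
    cases u with
    | zero =>
      have hps : psum (b :: bs) 1 = b.length := by simp [psum]
      rw [hps] at h2
      rw [List.flatten_cons, List.getD_append _ _ _ _ h2]
      simp [psum]
    | succ u =>
      rw [psum_cons_succ] at h1 h2
      rw [List.flatten_cons, List.getD_append_right _ _ _ _ (by omega)]
      rw [ih (j - b.length) u (by simpa using hu) (by omega) (by omega)]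
      rw [psum_cons_succ]
      congr 1
      omega

-- ---- scatter preserves the length of edges ----
theorem scat_len (l : List (Int × Int)) (e p : List Int) :
    (l.foldl aScatStep (e, p)).1.length = e.length := by
  induction l generalizing e p with
  | nil => rfl
  | cons q l ih =>
    simp only [List.foldl_cons]
    rw [ih]
    exact PySem.List.length_pySetD _ _ _

theorem list_eq_of_getD {α : Type} (xs ys : List α) (d : α) (hl : xs.length = ys.length)
    (h : ∀ j < xs.length, xs.getD j d = ys.getD j d) : xs = ys := by
  apply List.ext_getElem hl
  intro j h1 h2
  rw [← List.getD_eq_getElem xs d h1, ← List.getD_eq_getElem ys d h2]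
  exact h j h1

-- ---- assembly: each pipeline stage in closed form ----
theorem degA_eq (N : Int) (F : List (Int × Int)) (_hN : 0 ≤ N)
    (hdom : ∀ q ∈ F, 0 ≤ q.1 ∧ q.1 < N) :
    F.foldl aDegStep (List.replicate N.toNat (0 : Int))
      = (List.range N.toNat).map (fun i : Nat => (cnt (i : Int) F : Int)) := by
  obtain ⟨hlen, hpt⟩ := deg_fold F (List.replicate N.toNat (0 : Int))
    (by intro q hq; have := hdom q hq; simp; omega)
  apply list_eq_of_getD _ _ 0
  · simp [hlen]
  · intro j hj
    have hj' : j < N.toNat := by simpa [hlen] using hj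
    rw [hpt j (by simpa using hj'), List.getD_replicate 0 hj', List.getD_eq_getElem _ _
      (by simpa using hj'), List.getElem_map, List.getElem_range]
    simp

theorem bucketsB_eq (N : Int) (F : List (Int × Int)) (_hN : 0 ≤ N)
    (hdom : ∀ q ∈ F, 0 ≤ q.1 ∧ q.1 < N) :
    F.foldl bBuckStep (List.replicate N.toNat ([] : List Int))
      = (List.range N.toNat).map (fun i : Nat => vals (i : Int) F) := by
  obtain ⟨hlen, hpt⟩ := buck_fold F (List.replicate N.toNat ([] : List Int))
    (by intro q hq; have := hdom q hq; simp; omega)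
  apply list_eq_of_getD _ _ []
  · simp [hlen]
  · intro j hj
    have hj' : j < N.toNat := by simpa [hlen] using hj
    rw [hpt j (by simpa using hj'), List.getD_replicate [] hj', List.getD_eq_getElem _ _
      (by simpa using hj'), List.getElem_map, List.getElem_range]
    simp

theorem psum_buckets (F : List (Int × Int)) (K : Nat) (k : Nat) (hk : k ≤ K) :
    psum ((List.range K).map (fun i : Nat => vals (i : Int) F)) k = offf F k := by
  unfold psum
  rw [← List.map_take, List.take_range, Nat.min_eq_left hk, List.map_map, offf_eq_sum]
  congr 1
  apply List.map_congr_left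
  intro i _
  simp only [Function.comp_apply]
  exact length_vals _ _

theorem offB_eq (F : List (Int × Int)) (K : Nat) :
    (((List.range K).map (fun i : Nat => vals (i : Int) F)).foldl bOTStep ([0], 0)).1
      = (List.range (K + 1)).map (fun k => (offf F k : Int)) := by
  rw [ot_fold, List.range_succ_eq_map, List.map_cons, List.map_map]
  simp only [List.length_map, List.length_range, List.singleton_append]
  congr 1
  apply List.map_congr_left
  intro k hk
  simp only [Function.comp_apply, Nat.succ_eq_add_one]
  rw [psum_buckets F K (k + 1) (by have := List.mem_range.mp hk; omega)]
  omega

theorem offA_aux (F : List (Int × Int)) (K : Nat) (m : Nat) :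
    ∀ (i : Nat) (off : List Int), i + m = K → off.length = K + 1 →
    (∀ k ≤ K, off.getD k 0 = if k ≤ i then (offf F k : Int) else 0) →
    ((List.range' i m).foldl
        (fun (off : List Int) (k : Nat) => aOffStep ((List.range K).map (fun i : Nat => (cnt (i : Int) F : Int))) off (k : Int)) off)
      = (List.range (K + 1)).map (fun k => (offf F k : Int)) := by
  induction m with
  | zero =>
    intro i off him hlen hinv
    have hik : i = K := by omega
    subst hik
    simp only [List.range'_zero, List.foldl_nil]
    apply list_eq_of_getD _ _ 0
    · simp [hlen]
    · intro j hj
      rw [hlen] at hj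
      rw [hinv j (by omega), if_pos (by omega), List.getD_eq_getElem _ _ (by simpa using hj),
        List.getElem_map, List.getElem_range]
  | succ m ih =>
    intro i off him hlen hinv
    rw [List.range'_succ, List.foldl_cons]
    have hiK : i < K := by omega
    apply ih (i + 1)
    · omega
    · simp [aOffStep, PySem.List.length_pySetD, hlen]
    · intro k hk
      have hread : PySem.List.pyGetD off (i : Int) 0 = (offf F i : Int) := by
        rw [PySem.List.pyGetD_natCast, hinv i (by omega), if_pos (Nat.le_refl i)]
      have hdeg : PySem.List.pyGetD ((List.range K).map (fun i : Nat => (cnt (i : Int) F : Int))) (i : Int) 0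
          = (cnt (i : Int) F : Int) := by
        rw [PySem.List.pyGetD_natCast, PySem.List.getD_map_range _ _ _ _ hiK]
      have hcast : ((i : Int) + 1) = ((i + 1 : Nat) : Int) := by push_cast; ring
      simp only [aOffStep, hread, hdeg, hcast, PySem.List.pySetD_natCast]
      by_cases h1 : k = i + 1
      · subst h1
        rw [getD_set, if_pos ⟨rfl, by omega⟩, if_pos (by omega)]
        rw [offf_succ_sub]; push_cast; ring
      · rw [getD_set, if_neg (fun hc => h1 hc.1.symm), hinv k hk]
        by_cases hki : k ≤ i
        · rw [if_pos hki, if_pos (by omega)]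
        · rw [if_neg hki, if_neg (by omega)]

theorem offA_eq (N : Int) (F : List (Int × Int)) (hN : 0 ≤ N) :
    (PySem.List.pyRange 0 N 1).foldl
        (aOffStep ((List.range N.toNat).map (fun i : Nat => (cnt (i : Int) F : Int))))
        (List.replicate (N + 1).toNat (0 : Int))
      = (List.range (N.toNat + 1)).map (fun k => (offf F k : Int)) := by
  rw [PySem.List.pyRange_one, List.foldl_map]
  have h0 : (N - 0).toNat = N.toNat := by omega
  rw [h0]
  have hstep : (fun (off : List Int) (k : Nat) =>
      aOffStep ((List.range N.toNat).map (fun i : Nat => (cnt (i : Int) F : Int))) off (0 + (k : Int)))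
      = (fun (off : List Int) (k : Nat) => aOffStep ((List.range N.toNat).map (fun i : Nat => (cnt (i : Int) F : Int))) off (k : Int)) := by
    funext off k
    rw [Int.zero_add]
  rw [hstep]
  nth_rewrite 2 [List.range_eq_range']
  apply offA_aux F N.toNat N.toNat 0
  · omega
  · simp; omega
  · intro k hk
    have : (N + 1).toNat = N.toNat + 1 := by omega
    rw [this]
    by_cases hk0 : k ≤ 0
    · have : k = 0 := by omega
      subst this
      rw [if_pos (Nat.le_refl 0)]
      simp [offf]
    · rw [if_neg hk0]
      exact List.getD_replicate 0 (by omega)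

theorem edgesA_eq (N : Int) (F : List (Int × Int)) (hN : 0 ≤ N)
    (hdom : ∀ q ∈ F, 0 ≤ q.1 ∧ q.1 < N) :
    (F.foldl aScatStep (List.replicate F.length (0 : Int),
        (List.range (N.toNat + 1)).map (fun k => (offf F k : Int)))).1
      = ((List.range N.toNat).map (fun i : Nat => vals (i : Int) F)).flatten := by
  have hKN : (N.toNat : Int) = N := Int.toNat_of_nonneg hN
  have hdom' : ∀ q ∈ F, 0 ≤ q.1 ∧ q.1 < (N.toNat : Int) := by rw [hKN]; exact hdom
  have htot : offf F N.toNat = F.length := offf_total F N.toNat hdom'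
  have hoffget : ∀ w : Nat, w < N.toNat + 1 →
      PySem.List.pyGetD ((List.range (N.toNat + 1)).map (fun k => (offf F k : Int))) (w : Int) 0
        = (offf F w : Int) := by
    intro w hw
    rw [PySem.List.pyGetD_natCast, PySem.List.getD_map_range _ _ _ _ hw]
  have hflatlen : (((List.range N.toNat).map (fun i : Nat => vals (i : Int) F)).flatten).length
      = F.length := by
    rw [List.length_flatten]
    have := psum_buckets F N.toNat N.toNat (Nat.le_refl _)
    unfold psum at this
    rw [List.take_of_length_le (by simp)] at this
    rw [this, htot]
  apply list_eq_of_getD _ _ 0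
  · rw [scat_len, hflatlen]; simp
  · intro j hj
    rw [scat_len] at hj
    simp only [List.length_replicate] at hj
    obtain ⟨u, huK, hu1, hu2⟩ := exists_slot F N.toNat j (by omega)
    -- A side
    have hwu : ∀ q ∈ F, 0 ≤ q.1 ∧ q.1 <
        (((List.range (N.toNat + 1)).map (fun k => (offf F k : Int))).length : Int) := by
      intro q hq
      have := hdom q hq
      simp
      omega
    have hposF : ∀ q ∈ F, 0 ≤ PySem.List.pyGetD
        ((List.range (N.toNat + 1)).map (fun k => (offf F k : Int))) q.1 0 := by
      intro q hq
      have hq' := hdom q hq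
      have : q.1 = ((q.1.toNat : Nat) : Int) := by omega
      rw [this, hoffget q.1.toNat (by omega)]
      positivity
    have hdisjF : ∀ q ∈ F, q.1 ≠ (u : Int) →
        PySem.List.pyGetD ((List.range (N.toNat + 1)).map (fun k => (offf F k : Int))) q.1 0
            + (cnt q.1 F : Int)
          ≤ PySem.List.pyGetD ((List.range (N.toNat + 1)).map (fun k => (offf F k : Int))) (u : Int) 0 ∨
        PySem.List.pyGetD ((List.range (N.toNat + 1)).map (fun k => (offf F k : Int))) (u : Int) 0
            + (cnt (u : Int) F : Int)
          ≤ PySem.List.pyGetD ((List.range (N.toNat + 1)).map (fun k => (offf F k : Int))) q.1 0 := by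
      intro q hq hne
      have hq' := hdom q hq
      have hqe : q.1 = ((q.1.toNat : Nat) : Int) := by omega
      rw [hqe, hoffget q.1.toNat (by omega), hoffget u (by omega)]
      have hwne : q.1.toNat ≠ u := by omega
      have hcq : offf F (q.1.toNat + 1) = offf F q.1.toNat + cnt ((q.1.toNat : Nat) : Int) F :=
        offf_succ_sub F q.1.toNat
      have hcu : offf F (u + 1) = offf F u + cnt ((u : Nat) : Int) F := offf_succ_sub F u
      rcases Nat.lt_or_ge q.1.toNat u with hlt | hge
      · left
        have := offf_mono F (q.1.toNat + 1) u (by omega)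
        omega
      · right
        have := offf_mono F (u + 1) q.1.toNat (by omega)
        omega
    have hhit := scat_hit F (List.replicate F.length (0 : Int))
      ((List.range (N.toNat + 1)).map (fun k => (offf F k : Int))) (u : Int) (j - offf F u)
      ⟨by positivity, by simp; omega⟩
      (by rw [hoffget u (by omega)]; positivity)
      hwu hposF
      (by have := offf_succ_sub F u; omega)
      hdisjF
      (by rw [hoffget u (by omega)]
          have := offf_succ_sub F u
          have := offf_mono F (u + 1) N.toNat (by omega)
          simp
          omega)
    rw [hoffget u (by omega)] at hhit
    rw [Int.toNat_natCast] at hhit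
    have hidx : offf F u + (j - offf F u) = j := by omega
    rw [hidx] at hhit
    rw [hhit]
    -- flatten side
    have hpsu : psum ((List.range N.toNat).map (fun i : Nat => vals (i : Int) F)) u = offf F u :=
      psum_buckets F N.toNat u (by omega)
    have hpsu1 : psum ((List.range N.toNat).map (fun i : Nat => vals (i : Int) F)) (u + 1) = offf F (u + 1) :=
      psum_buckets F N.toNat (u + 1) (by omega)
    rw [flatten_getD ((List.range N.toNat).map (fun i : Nat => vals (i : Int) F)) j u
      (by simp [huK]) (by rw [hpsu]; omega) (by rw [hpsu1]; omega)]
    rw [hpsu, List.getD_eq_getElem ((List.range N.toNat).map (fun i : Nat => vals (i : Int) F)) []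
      (n := u) (by simp; omega), List.getElem_map, List.getElem_range]

-- ===== VERDICT (by name: the statement is the Claim_ definition above) =====
theorem degB_map (F : List (Int × Int)) (K : Nat) :
    ((List.range K).map (fun i : Nat => vals (i : Int) F)).map (fun b => (b.length : Int))
      = (List.range K).map (fun i : Nat => (cnt (i : Int) F : Int)) := by
  rw [List.map_map]
  apply List.map_congr_left
  intro i _
  simp [length_vals]

theorem edges_to_csr_spec : Claim_equal_edges_to_csr := by
  intro N F _ hpre
  obtain ⟨hN, hdom⟩ := hpre
  unfold Spec_edges_to_csr
  simp only [edges_to_csr, edges_to_csr_alt]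
  rw [degA_eq N F hN hdom, bucketsB_eq N F hN hdom, offA_eq N F hN, offB_eq F N.toNat,
    cat_fold, List.nil_append, edgesA_eq N F hN hdom, degB_map F N.toNat]
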